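-- pv_equiv track=rewrite | github.com/Danna-Medina/Proyecto-Python | d08-p14-danna-medina-W.py | espacios
-- ===== SOURCE A (Python) =====
-- def espacios(palabra, bucle):  # Crea espacios en blanco para simular una tabla en los datos guardados en el txt.
--     letras = len(palabra);
--     es = " ";
--     if letras < bucle:
--         for i in range(bucle):
--             es += " ";
--             letras += 1;
--             if letras == bucle:
--                 break;
--     return es;
-- ===== SOURCE B (Python) =====
-- def espacios(palabra, bucle):
--     # Closed form: one leading space plus (bucle - len(palabra)) padding spaces.
--     if len(palabra) < bucle:
--         return " " * (bucle - len(palabra) + 1)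
--     return " "
-- ===== Notes on version B (the rewrite author's own statement) =====
-- stated objective: simpler
-- what changed: Replaces the counter-incrementing loop with a break by a closed-form string multiplication ' ' * (bucle - len(palabra) + 1).
import Mathlib
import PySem

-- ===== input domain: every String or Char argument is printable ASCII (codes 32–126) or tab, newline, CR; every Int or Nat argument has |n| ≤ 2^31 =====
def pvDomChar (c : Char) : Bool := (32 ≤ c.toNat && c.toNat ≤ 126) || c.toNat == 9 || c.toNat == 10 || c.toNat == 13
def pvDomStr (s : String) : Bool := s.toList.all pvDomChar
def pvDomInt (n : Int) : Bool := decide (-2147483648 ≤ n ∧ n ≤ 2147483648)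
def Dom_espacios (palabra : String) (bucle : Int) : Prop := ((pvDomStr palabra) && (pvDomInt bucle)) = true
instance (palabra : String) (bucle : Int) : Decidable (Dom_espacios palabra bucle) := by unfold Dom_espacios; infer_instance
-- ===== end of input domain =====

-- B replaces A's counter loop (with its break) by a closed-form space count; objective: simpler.

-- ===== PORT A =====
-- the 'for i in range(bucle): es += " "; letras += 1; if letras == bucle: break' loop
def espaciosLoopA : List Int → Int → Int → String → String
  | [], _, _, es => es
  | _ :: rest, letras, bucle, es =>
    let es' := es ++ " "
    let letras' := letras + 1
    if letras' = bucle then es' else espaciosLoopA rest letras' bucle es'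

def espacios (palabra : String) (bucle : Int) : String :=
  let letras : Int := palabra.toList.length
  let es := " "
  if letras < bucle then espaciosLoopA (PySem.List.pyRange 0 bucle 1) letras bucle es
  else es

-- ===== PORT B =====
def espacios_alt (palabra : String) (bucle : Int) : String :=
  let letras : Int := palabra.toList.length
  if letras < bucle then String.ofList (PySem.List.pyRepeat [' '] (bucle - letras + 1))
  else " "

-- ===== PRECONDITION & SPEC =====
def Spec_espacios (palabra : String) (bucle : Int) (out : String) : Prop := out = espacios_alt palabra bucle
instance (palabra : String) (bucle : Int) (out : String) : Decidable (Spec_espacios palabra bucle out) := by unfold Spec_espacios; infer_instance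

-- ===== CLAIM (what is proved, stated in full; the proofs are below) =====
def Claim_equal_espacios : Prop := ∀ (palabra : String) (bucle : Int), Dom_espacios palabra bucle → Spec_espacios palabra bucle (espacios palabra bucle)

-- ===== LEMMAS AND PROOFS =====

lemma espaciosLoopA_eq (l : List Int) (letras bucle : Int) (es : String)
    (hlt : letras < bucle) (hlen : bucle - letras ≤ l.length) :
    espaciosLoopA l letras bucle es = es ++ String.ofList (List.replicate (bucle - letras).toNat ' ') := by
  induction l generalizing letras es with
  | nil => simp at hlen; omega
  | cons x rest ih =>
    simp only [espaciosLoopA]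
    by_cases h : letras + 1 = bucle
    · simp only [if_pos h]
      have h1 : (bucle - letras).toNat = 1 := by omega
      rw [h1]
      apply String.toList_injective; simp
    · simp only [if_neg h]
      have h1 : letras + 1 < bucle := by omega
      have h2 : bucle - (letras + 1) ≤ (rest.length : Int) := by
        simp at hlen; omega
      rw [ih (letras + 1) (es ++ " ") h1 h2]
      have hn : (bucle - letras).toNat = (bucle - (letras + 1)).toNat + 1 := by omega
      rw [hn, List.replicate_succ, String.append_assoc]
      congr 1
      apply String.toList_injective; simp

-- ===== VERDICT (by name: the statement is the Claim_ definition above) =====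
theorem espacios_spec : Claim_equal_espacios := by
  intro palabra bucle _
  unfold Spec_espacios espacios espacios_alt
  set letras : Int := (palabra.toList.length : Int) with hl
  by_cases h : letras < bucle
  · simp only [if_pos h]
    have hlen : bucle - letras ≤ ((PySem.List.pyRange 0 bucle 1).length : Int) := by
      rw [PySem.List.length_pyRange_one]; omega
    rw [espaciosLoopA_eq _ _ _ _ h hlen, PySem.List.pyRepeat_singleton]
    have : (bucle - letras + 1).toNat = (bucle - letras).toNat + 1 := by omega
    rw [this, List.replicate_succ]
    apply String.toList_injective; simp
  · simp only [if_neg h]
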